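-- pv_equiv track=rewrite | github.com/chilung-cgu/learning-agentic-workflow | scripts/extract_new_changelog.py | parse_version_blocks
-- ===== SOURCE A (Python) =====
-- def parse_version_blocks(content):
--     """
--     將 changelog 內容解析為版本區塊 list。
--     每個版本區塊以 '## ' 開頭的行作為標題。
--     回傳： list of {'header': str, 'content': str}
--     """
--     lines = content.split('\n')
--     blocks = []
--     current_header = None
--     current_block_lines = []
--
--     for line in lines:
--         if line.startswith('## '):
--             # 遇到新的版本標題，先把上一個 block 存起來
--             if current_header is not None:
--                 blocks.append({
--                     'header': current_header,
--                     'content': '\n'.join(current_block_lines).strip()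
--                 })
--             current_header = line
--             current_block_lines = [line]
--         elif current_header is not None:
--             current_block_lines.append(line)
--
--     # 別忘了最後一個 block
--     if current_header is not None:
--         blocks.append({
--             'header': current_header,
--             'content': '\n'.join(current_block_lines).strip()
--         })
--
--     return blocks
-- ===== SOURCE B (Python) =====
-- def parse_version_blocks(content):
--     """Slice-based re-implementation: find header line indices by scanning
--     pointers and cut the line list into chunks; one dict per chunk."""
--     lines = content.split('\n')
--     n = len(lines)
--     i = 0
--     while i < n and not lines[i].startswith('## '):
--         i += 1
--     blocks = []
--     while i < n:
--         j = i + 1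
--         while j < n and not lines[j].startswith('## '):
--             j += 1
--         chunk = lines[i:j]
--         blocks.append({'header': chunk[0],
--                        'content': '\n'.join(chunk).strip()})
--         i = j
--     return blocks
-- ===== Notes on version B (the rewrite author's own statement) =====
-- stated objective: alternative
-- what changed: Replaced A's single-pass state machine (current_header/current_block_lines accumulator with a trailing flush) by a pointer/slice decomposition: skip the preamble, then repeatedly scan to the next header line and slice the chunk lines[i:j] into a block.
import Mathlib
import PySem

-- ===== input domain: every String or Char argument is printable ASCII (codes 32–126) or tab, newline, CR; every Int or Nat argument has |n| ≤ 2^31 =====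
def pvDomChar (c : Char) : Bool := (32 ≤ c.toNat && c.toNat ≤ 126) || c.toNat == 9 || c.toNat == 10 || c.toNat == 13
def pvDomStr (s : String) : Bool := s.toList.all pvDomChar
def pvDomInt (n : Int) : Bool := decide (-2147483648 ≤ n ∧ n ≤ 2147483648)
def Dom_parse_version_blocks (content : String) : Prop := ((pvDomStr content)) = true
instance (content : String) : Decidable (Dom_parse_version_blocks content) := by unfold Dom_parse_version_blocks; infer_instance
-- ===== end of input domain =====

-- B replaces A's accumulator state machine by pointer scans over slices of the line list; same values, similar cost.

-- ===== PORT A =====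
-- the dict {'header': h, 'content': '\n'.join(cur).strip()}
def pvMkA (h : String) (cur : List String) : List (String × String) :=
  [("header", h), ("content", PySem.Str.strip (PySem.Str.join "\n" cur))]

-- the loop body of A: state = (blocks, current_header, current_block_lines)
def pvStepA (st : List (List (String × String)) × Option String × List String)
    (line : String) : List (List (String × String)) × Option String × List String :=
  if PySem.Str.startswith line "## " then
    match st.2.1 with
    | none => (st.1, some line, [line])
    | some h => (st.1 ++ [pvMkA h st.2.2], some line, [line])
  else
    match st.2.1 with
    | none => st
    | some _ => (st.1, st.2.1, st.2.2 ++ [line])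

-- A's trailing "don't forget the last block" flush
def pvFinishA (st : List (List (String × String)) × Option String × List String) :
    List (List (String × String)) :=
  match st.2.1 with
  | none => st.1
  | some h => st.1 ++ [pvMkA h st.2.2]

def parse_version_blocks (content : String) : List (List (String × String)) :=
  let lines := (PySem.Str.split? content "\n").getD []
  pvFinishA (lines.foldl pvStepA ([], none, []))

-- ===== PORT B =====
def pvIsHeader (l : String) : Bool := PySem.Str.startswith l "## "

-- the outer while loop of B: lines[i:], where lines[i] is a header (or the list is empty);
-- the inner 'while j < n and not header' scan is takeWhile/dropWhile on the tail
def pvGoB (ls : List String) : List (List (String × String)) :=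
  match ls with
  | [] => []
  | h :: t =>
      [("header", h),
       ("content", PySem.Str.strip (PySem.Str.join "\n" (h :: t.takeWhile (fun l => !pvIsHeader l))))]
        :: pvGoB (t.dropWhile (fun l => !pvIsHeader l))
termination_by ls.length
decreasing_by
  simp only [List.length_cons]
  exact Nat.lt_succ_of_le (List.length_dropWhile_le _ _)

def parse_version_blocks_alt (content : String) : List (List (String × String)) :=
  -- first while loop: advance i past the preamble = dropWhile not-header
  pvGoB (((PySem.Str.split? content "\n").getD []).dropWhile (fun l => !pvIsHeader l))

-- ===== PRECONDITION & SPEC =====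
def Spec_parse_version_blocks (content : String) (out : List (List (String × String))) : Prop := out = parse_version_blocks_alt content
instance (content : String) (out : List (List (String × String))) : Decidable (Spec_parse_version_blocks content out) := by unfold Spec_parse_version_blocks; infer_instance

-- ===== CLAIM (what is proved, stated in full; the proofs are below) =====
def Claim_equal_parse_version_blocks : Prop := ∀ (content : String), Dom_parse_version_blocks content → Spec_parse_version_blocks content (parse_version_blocks content)

-- ===== LEMMAS AND PROOFS =====

-- A's loop from a state that already holds a header hd and collected lines cur
lemma pvLoopA (ls : List String) (bs : List (List (String × String)))
    (hd : String) (cur : List String) :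
    pvFinishA (ls.foldl pvStepA (bs, some hd, cur)) =
      bs ++ pvMkA hd (cur ++ ls.takeWhile (fun l => !pvIsHeader l))
         :: pvGoB (ls.dropWhile (fun l => !pvIsHeader l)) := by
  induction ls generalizing bs hd cur with
  | nil => simp [pvFinishA, pvGoB]
  | cons l ls ih =>
      by_cases hl : pvIsHeader l
      · have hstep : pvStepA (bs, some hd, cur) l = (bs ++ [pvMkA hd cur], some l, [l]) := by
          simp [pvStepA, pvIsHeader] at hl ⊢; simp [hl]
        rw [List.foldl_cons, hstep, ih]
        rw [List.takeWhile_cons_of_neg (by simp [hl]), List.dropWhile_cons_of_neg (by simp [hl]), pvGoB]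
        simp [pvMkA]
      · have hstep : pvStepA (bs, some hd, cur) l = (bs, some hd, cur ++ [l]) := by
          simp [pvStepA, pvIsHeader] at hl ⊢; simp [hl]
        rw [List.foldl_cons, hstep, ih]
        simp [hl]

-- A's loop from the initial state (no header seen yet)
lemma pvStartA (ls : List String) :
    pvFinishA (ls.foldl pvStepA ([], none, [])) =
      pvGoB (ls.dropWhile (fun l => !pvIsHeader l)) := by
  induction ls with
  | nil => simp [pvFinishA, pvGoB]
  | cons l ls ih =>
      by_cases hl : pvIsHeader l
      · have hstep : pvStepA ([], none, []) l = ([], some l, [l]) := by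
          simp [pvStepA, pvIsHeader] at hl ⊢; simp [hl]
        rw [List.foldl_cons, hstep, pvLoopA]
        rw [List.dropWhile_cons_of_neg (by simp [hl]), pvGoB]
        simp [pvMkA]
      · have hstep : pvStepA ([], none, []) l = ([], none, []) := by
          simp [pvStepA, pvIsHeader] at hl ⊢; simp [hl]
        rw [List.foldl_cons, hstep, ih]
        simp [hl]

-- ===== VERDICT (by name: the statement is the Claim_ definition above) =====
theorem parse_version_blocks_spec : Claim_equal_parse_version_blocks := by
  intro content _
  unfold Spec_parse_version_blocks parse_version_blocks parse_version_blocks_alt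
  exact pvStartA _
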